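-- pv_equiv track=rewrite | github.com/Sp0xF8/AA | docs/week 8/task1.py | naiveSearching
-- ===== SOURCE A (Python) =====
-- def naiveSearching(pattern, text):
--     lp = len(pattern)
--     lt = len(text)
--     count = 0
--     i = 0
--     j = 0
--
--
--     for i in range(lt-lp+1):
--         found = True
--         for j in range(lp):
--             if text[i+j] != pattern[j]:
--                 found = False
--                 break
--         if found:
--             print ("Found pattern at index " + str(i))
--             count+=1
--
--     return count
-- ===== SOURCE B (Python) =====
-- def naiveSearching(pattern, text):
--     lp = len(pattern)
--     lt = len(text)
--     if lp == 0:
--         for i in range(lt + 1):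
--             print("Found pattern at index " + str(i))
--         return lt + 1
--     if lp > lt:
--         return 0
--     M = (1 << 61) - 1
--     B = 257
--     ph = 0
--     for c in pattern:
--         ph = (ph * B + ord(c)) % M
--     th = 0
--     for c in text[:lp]:
--         th = (th * B + ord(c)) % M
--     high = pow(B, lp - 1, M)
--     count = 0
--     for i in range(lt - lp + 1):
--         if th == ph and text[i:i + lp] == pattern:
--             print("Found pattern at index " + str(i))
--             count += 1
--         if i + lp < lt:
--             th = ((th - ord(text[i]) * high) * B + ord(text[i + lp])) % M
--     return count
-- ===== Notes on version B (the rewrite author's own statement) =====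
-- stated objective: alternative
-- what changed: Replaces A's nested char-by-char scan at every start position with Rabin-Karp rolling-hash matching: a window hash is updated in O(1) per shift and the candidate slice is compared only when its hash equals the pattern's hash.
import Mathlib
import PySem

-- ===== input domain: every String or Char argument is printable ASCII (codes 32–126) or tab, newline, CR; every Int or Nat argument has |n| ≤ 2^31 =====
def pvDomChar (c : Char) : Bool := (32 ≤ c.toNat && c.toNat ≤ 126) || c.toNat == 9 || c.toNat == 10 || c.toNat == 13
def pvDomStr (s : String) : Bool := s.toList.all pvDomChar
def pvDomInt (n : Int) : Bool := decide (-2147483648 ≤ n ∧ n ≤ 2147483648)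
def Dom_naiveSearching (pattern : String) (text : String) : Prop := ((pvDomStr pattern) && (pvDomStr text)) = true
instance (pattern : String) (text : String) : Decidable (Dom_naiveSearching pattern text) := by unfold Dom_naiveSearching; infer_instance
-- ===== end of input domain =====

-- B replaces A's nested char-by-char scan with Rabin–Karp rolling-hash matching (hash filter + verification);
-- equivalence is about the RETURN value (both also print the same "Found pattern at index i" lines).

-- ===== PORT A =====
-- inner loop: for j in range(lp): if text[i+j] != pattern[j]: found=False; break
-- (indices i+j and j are always in range when called from the outer loop, so pyGet? never returns none there)
def pvAInner (p t : List Char) (i : Nat) : Nat → Nat → Bool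
  | 0, _ => true
  | fuel+1, j =>
    if PySem.List.pyGet? t ((i+j : Nat) : Int) ≠ PySem.List.pyGet? p ((j : Nat) : Int) then false
    else pvAInner p t i fuel (j+1)

-- outer loop: for i in range(lt-lp+1), accumulating count
def pvALoop (p t : List Char) : Nat → Nat → Int → Int
  | 0, _, count => count
  | fuel+1, i, count =>
    pvALoop p t fuel (i+1) (if pvAInner p t i p.length 0 then count + 1 else count)

def naiveSearching (pattern : String) (text : String) : Int :=
  pvALoop pattern.toList text.toList (text.toList.length + 1 - pattern.toList.length) 0 0

-- ===== PORT B =====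
def pvM : Int := 2305843009213693951  -- (1 << 61) - 1

-- h = (h * B + ord(c)) % M
def pvHStep (h : Int) (c : Char) : Int := PySem.Int.mod (h * 257 + (c.toNat : Int)) pvM

-- ord(text[k]); every use is guarded to be in range, the 0 default is never read
def pvOrd (t : List Char) (k : Nat) : Int :=
  match t[k]? with
  | some c => (c.toNat : Int)
  | none => 0

-- for i in range(lt-lp+1): hash-compare, verify slice, roll the hash
def pvBLoop (p t : List Char) (ph high : Int) : Nat → Nat → Int → Int → Int
  | 0, _, _, count => count
  | fuel+1, i, th, count =>
    pvBLoop p t ph high fuel (i+1)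
      (if (i : Int) + (p.length : Int) < (t.length : Int) then
        PySem.Int.mod ((th - pvOrd t i * high) * 257 + pvOrd t (i + p.length)) pvM
      else th)
      (if th = ph ∧ PySem.List.slice t (some (i : Int)) (some ((i : Int) + (p.length : Int))) = p then
        count + 1
      else count)

def naiveSearching_alt (pattern : String) (text : String) : Int :=
  let p := pattern.toList
  let t := text.toList
  if p.length = 0 then (t.length : Int) + 1
  else if t.length < p.length then 0
  else
    pvBLoop p t (p.foldl pvHStep 0) (PySem.Int.powMod 257 (p.length - 1) pvM)
      (t.length + 1 - p.length) 0 ((t.take p.length).foldl pvHStep 0) 0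

-- ===== PRECONDITION & SPEC =====
def Spec_naiveSearching (pattern : String) (text : String) (out : Int) : Prop := out = naiveSearching_alt pattern text
instance (pattern : String) (text : String) (out : Int) : Decidable (Spec_naiveSearching pattern text out) := by unfold Spec_naiveSearching; infer_instance

-- ===== CLAIM (what is proved, stated in full; the proofs are below) =====
def Claim_equal_naiveSearching : Prop := ∀ (pattern : String) (text : String), Dom_naiveSearching pattern text → Spec_naiveSearching pattern text (naiveSearching pattern text)

-- ===== LEMMAS AND PROOFS =====

-- the match count both loops compute: number of i in [i0, i0+fuel) with window = pattern
def pvWin (t : List Char) (i lp : Nat) : List Char := (t.drop i).take lp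

def pvCnt (p t : List Char) : Nat → Nat → Int
  | 0, _ => 0
  | fuel+1, i => (if pvWin t i p.length = p then 1 else 0) + pvCnt p t fuel (i+1)

def pvHash (l : List Char) : Int := l.foldl pvHStep 0

def pvPStep (h : Int) (c : Char) : Int := h * 257 + (c.toNat : Int)

def pvPoly (l : List Char) : Int := l.foldl pvPStep 0

lemma pvM_pos : (0 : Int) < pvM := by decide

-- mod reduction is congruence-invisible
lemma pvMod_eq_of_modEq {a b : Int} (h : a ≡ b [ZMOD pvM]) :
    PySem.Int.mod a pvM = PySem.Int.mod b pvM := by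
  rw [PySem.Int.mod_eq_emod_of_pos pvM_pos, PySem.Int.mod_eq_emod_of_pos pvM_pos]
  exact h

-- A's inner loop decides "window equals pattern", suffix by suffix
lemma pvAInner_eq (p t : List Char) (i : Nat) :
    ∀ (fuel j : Nat), i + p.length ≤ t.length → j + fuel = p.length →
      pvAInner p t i fuel j = decide ((t.drop (i+j)).take fuel = p.drop j) := by
  intro fuel
  induction fuel with
  | zero =>
    intro j hle hj
    rw [pvAInner, List.drop_eq_nil_of_le (by omega : p.length ≤ j)]
    simp
  | succ fuel ih =>
    intro j hle hj
    have hjp : j < p.length := by omega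
    have hit : i + j < t.length := by omega
    rw [pvAInner, PySem.List.pyGet?_natCast, PySem.List.pyGet?_natCast,
        List.getElem?_eq_getElem hit, List.getElem?_eq_getElem hjp,
        List.drop_eq_getElem_cons hit, List.drop_eq_getElem_cons hjp, List.take_succ_cons]
    by_cases hc : t[i+j] = p[j]
    · rw [if_neg (by simp [hc])]
      have h2 := ih (j+1) hle (by omega)
      rw [show i + (j+1) = i + j + 1 by omega] at h2
      rw [h2, decide_eq_decide, List.cons_eq_cons]
      simp [hc]
    · rw [if_pos (by simp [hc])]
      have hne : ¬ (t[i+j] :: (t.drop (i+j+1)).take fuel = p[j] :: p.drop (j+1)) := by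
        simp only [List.cons_eq_cons]; tauto
      rw [decide_eq_false hne]

-- A's outer loop accumulates the match count
lemma pvALoop_eq (p t : List Char) :
    ∀ (fuel i : Nat) (count : Int), i + fuel ≤ t.length + 1 - p.length →
      pvALoop p t fuel i count = count + pvCnt p t fuel i := by
  intro fuel
  induction fuel with
  | zero => intro i count _; simp [pvALoop, pvCnt]
  | succ fuel ih =>
    intro i count hle
    have h1 : i + p.length ≤ t.length := by omega
    rw [pvALoop, pvCnt, ih (i+1) _ (by omega)]
    rw [pvAInner_eq p t i p.length 0 h1 (by omega)]
    simp only [Nat.add_zero, List.drop_zero]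
    by_cases hc : pvWin t i p.length = p
    · simp only [pvWin] at hc; simp [pvWin, hc]; ring
    · simp only [pvWin] at hc; simp [pvWin, hc]

lemma pvPoly_foldl (l : List Char) : ∀ h : Int, l.foldl pvPStep h = h * 257 ^ l.length + pvPoly l := by
  induction l with
  | nil => intro h; simp [pvPoly]
  | cons c l ih =>
    intro h
    simp only [List.foldl_cons, List.length_cons, pvPoly] at *
    rw [ih (pvPStep h c), ih (pvPStep 0 c)]
    simp [pvPStep]; ring

-- the modular hash is congruent to the plain polynomial
lemma pvHash_modEq (l : List Char) :
    ∀ h h' : Int, h ≡ h' [ZMOD pvM] → l.foldl pvHStep h ≡ l.foldl pvPStep h' [ZMOD pvM] := by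
  induction l with
  | nil => intro h h' hh; simpa using hh
  | cons c l ih =>
    intro h h' hh
    simp only [List.foldl_cons]
    apply ih
    have : pvHStep h c ≡ h * 257 + (c.toNat : Int) [ZMOD pvM] := by
      simp [pvHStep, PySem.Int.mod_eq_emod_of_pos pvM_pos, Int.ModEq, Int.emod_emod_of_dvd]
    exact this.trans (((hh.mul_right 257).add_right _))

-- rolling-hash update is exact
lemma pvRoll (p t : List Char) (i : Nat) (hlp : 1 ≤ p.length) (hlt : i + p.length < t.length) :
    pvHash (pvWin t (i+1) p.length) =
      PySem.Int.mod ((pvHash (pvWin t i p.length) - pvOrd t i * PySem.Int.powMod 257 (p.length - 1) pvM) * 257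
        + pvOrd t (i + p.length)) pvM := by
  set lp := p.length with hlpdef
  have hi : i < t.length := by omega
  have hc : i + lp < t.length := hlt
  set r : List Char := (t.drop (i+1)).take (lp-1) with hrdef
  have hr : r.length = lp - 1 := by
    simp [hrdef, List.length_take, List.length_drop]; omega
  have hwi : pvWin t i lp = t[i] :: r := by
    rw [pvWin, List.drop_eq_getElem_cons hi, show lp = (lp-1)+1 by omega, List.take_succ_cons]
  have hwi1 : pvWin t (i+1) lp = r ++ [t[i+lp]] := by
    rw [pvWin]
    conv_lhs => rw [show lp = (lp-1)+1 by omega]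
    rw [List.take_add_one, List.getElem?_drop, show i+1+(lp-1) = i+lp by omega,
        List.getElem?_eq_getElem hc]
    simp
    exact hrdef.symm
  have hoi : pvOrd t i = (t[i].toNat : Int) := by
    rw [pvOrd, List.getElem?_eq_getElem hi]
  have hoc : pvOrd t (i+lp) = (t[i+lp].toNat : Int) := by
    rw [pvOrd, List.getElem?_eq_getElem hc]
  have hL : pvHash (pvWin t (i+1) lp)
      = PySem.Int.mod (pvHash r * 257 + (t[i+lp].toNat : Int)) pvM := by
    rw [hwi1, pvHash, List.foldl_append]
    rfl
  rw [hL, hoi, hoc, hwi]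
  apply pvMod_eq_of_modEq
  have hhr : pvHash r ≡ pvPoly r [ZMOD pvM] := pvHash_modEq r 0 0 (Int.ModEq.refl 0)
  have hhw : pvHash (t[i] :: r) ≡ (t[i].toNat : Int) * 257 ^ (lp-1) + pvPoly r [ZMOD pvM] := by
    have h1 : pvHash (t[i] :: r) ≡ pvPoly (t[i] :: r) [ZMOD pvM] :=
      pvHash_modEq (t[i] :: r) 0 0 (Int.ModEq.refl 0)
    have h2 : pvPoly (t[i] :: r) = (t[i].toNat : Int) * 257 ^ (lp-1) + pvPoly r := by
      rw [pvPoly, List.foldl_cons, pvPoly_foldl r, hr]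
      simp [pvPStep]
    rw [h2] at h1; exact h1
  have hhigh : PySem.Int.powMod 257 (lp-1) pvM ≡ 257 ^ (lp-1) [ZMOD pvM] := by
    rw [PySem.Int.powMod, PySem.Int.mod_eq_emod_of_pos pvM_pos]
    exact Int.emod_emod_of_dvd _ dvd_rfl
  calc pvHash r * 257 + (t[i+lp].toNat : Int)
      ≡ pvPoly r * 257 + (t[i+lp].toNat : Int) [ZMOD pvM] := (hhr.mul_right 257).add_right _
    _ ≡ ((((t[i].toNat : Int) * 257 ^ (lp-1) + pvPoly r) - (t[i].toNat : Int) * 257 ^ (lp-1)) * 257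
          + (t[i+lp].toNat : Int)) [ZMOD pvM] := by
        have : pvPoly r = (((t[i].toNat : Int) * 257 ^ (lp-1) + pvPoly r) - (t[i].toNat : Int) * 257 ^ (lp-1)) := by ring
        rw [← this]
    _ ≡ (pvHash (t[i] :: r) - (t[i].toNat : Int) * PySem.Int.powMod 257 (lp-1) pvM) * 257
          + (t[i+lp].toNat : Int) [ZMOD pvM] :=
        (((hhw.symm.sub ((Int.ModEq.refl _).mul hhigh.symm)).mul_right 257).add_right _)

-- B's loop also accumulates the match count, carrying the window hash
lemma pvBLoop_eq (p t : List Char) (hlp : 1 ≤ p.length) (hle : p.length ≤ t.length) :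
    ∀ (fuel i : Nat) (th count : Int), i + fuel ≤ t.length + 1 - p.length →
      th = pvHash (pvWin t i p.length) →
      pvBLoop p t (pvHash p) (PySem.Int.powMod 257 (p.length - 1) pvM) fuel i th count
        = count + pvCnt p t fuel i := by
  intro fuel
  induction fuel with
  | zero => intro i th count _ _; simp [pvBLoop, pvCnt]
  | succ fuel ih =>
    intro i th count hb hth
    rw [pvBLoop, pvCnt]
    have hslice : PySem.List.slice t (some (i : Int)) (some ((i : Int) + (p.length : Int)))
        = pvWin t i p.length := PySem.List.slice_natCast_add t i p.length
    have hcond : (th = pvHash p ∧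
        PySem.List.slice t (some (i : Int)) (some ((i : Int) + (p.length : Int))) = p)
        ↔ pvWin t i p.length = p := by
      rw [hslice]
      exact ⟨fun h => h.2, fun h => ⟨by rw [hth, h], h⟩⟩
    rcases Nat.eq_zero_or_pos fuel with hf | hf
    · subst hf
      rw [pvBLoop, pvCnt]
      by_cases hw : pvWin t i p.length = p
      · rw [if_pos (hcond.mpr hw), if_pos hw]; ring
      · rw [if_neg (fun h => hw (hcond.mp h)), if_neg hw]; ring
    · have hguard : (i : Int) + (p.length : Int) < (t.length : Int) := by
        omega
      rw [if_pos hguard]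
      rw [ih (i+1) _ _ (by omega) (by rw [pvRoll p t i hlp (by omega), hth])]
      by_cases hw : pvWin t i p.length = p
      · rw [if_pos (hcond.mpr hw), if_pos hw]; ring
      · rw [if_neg (fun h => hw (hcond.mp h)), if_neg hw]; ring

lemma pvCnt_nil (t : List Char) : ∀ (fuel i : Nat), pvCnt [] t fuel i = (fuel : Int) := by
  intro fuel
  induction fuel with
  | zero => intro i; simp [pvCnt]
  | succ fuel ih => intro i; simp [pvCnt, pvWin, ih]; omega

-- ===== VERDICT (by name: the statement is the Claim_ definition above) =====
theorem naiveSearching_spec : Claim_equal_naiveSearching := by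
  intro pattern text _
  unfold Spec_naiveSearching naiveSearching naiveSearching_alt
  set p := pattern.toList with hp
  set t := text.toList with ht
  by_cases h0 : p.length = 0
  · rw [if_pos h0]
    have hpnil : p = [] := List.length_eq_zero_iff.mp h0
    rw [pvALoop_eq p t _ 0 0 (by omega), hpnil, pvCnt_nil]
    simp
  · rw [if_neg h0]
    by_cases h1 : t.length < p.length
    · rw [if_pos h1, show t.length + 1 - p.length = 0 by omega, pvALoop]
    · rw [if_neg h1, pvALoop_eq p t _ 0 0 (by omega)]
      have hth : (t.take p.length).foldl pvHStep 0 = pvHash (pvWin t 0 p.length) := rfl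
      rw [show p.foldl pvHStep 0 = pvHash p from rfl, hth,
          pvBLoop_eq p t (by omega) (by omega) _ 0 _ 0 (by omega) rfl]
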